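-- pv_equiv track=rewrite | github.com/drussell23/JARVIS-AI | backend/vision/dynamic_multi_window_engine.py | _discover_category_from_tokens
-- ===== SOURCE A (Python) =====
-- from typing import List, Dict, Optional, Tuple, Any
--
-- def _discover_category_from_tokens(tokens: List[str]) -> Optional[str]:
--     """Discover new category from token patterns"""
--     # Look for common patterns that suggest category
--     # This is ML-based discovery, not hardcoding
--
--     # Analyze token patterns
--     if any(t in tokens for t in ['message', 'chat', 'mail', 'inbox', 'conversation']):
--         return 'communication'
--     elif any(t in tokens for t in ['code', 'editor', 'ide', 'development', 'script']):
--         return 'development'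
--     elif any(t in tokens for t in ['terminal', 'console', 'shell', 'command']):
--         return 'terminal'
--     elif any(t in tokens for t in ['browser', 'web', 'internet', 'online']):
--         return 'browser'
--     elif any(t in tokens for t in ['doc', 'document', 'pdf', 'note', 'text']):
--         return 'documentation'
--
--     # If no clear category, create a descriptive one from tokens
--     if len(tokens) >= 2:
--         return f"{tokens[0]}_{tokens[1]}_category"
--
--     return None
-- ===== SOURCE B (Python) =====
-- from typing import List, Optional
--
-- # keyword -> priority rank of its category (0 = communication ... 4 = documentation)
-- _RANK = {
--     'message': 0, 'chat': 0, 'mail': 0, 'inbox': 0, 'conversation': 0,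
--     'code': 1, 'editor': 1, 'ide': 1, 'development': 1, 'script': 1,
--     'terminal': 2, 'console': 2, 'shell': 2, 'command': 2,
--     'browser': 3, 'web': 3, 'internet': 3, 'online': 3,
--     'doc': 4, 'document': 4, 'pdf': 4, 'note': 4, 'text': 4,
-- }
-- _NAMES = ['communication', 'development', 'terminal', 'browser', 'documentation']
--
-- def _discover_category_from_tokens(tokens: List[str]) -> Optional[str]:
--     """Discover new category from token patterns (one pass, min-priority accumulator)."""
--     best = 5
--     for t in tokens:
--         r = _RANK.get(t, 5)
--         if r < best:
--             best = r
--     if best < 5: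
--         return _NAMES[best]
--     if len(tokens) >= 2:
--         return f"{tokens[0]}_{tokens[1]}_category"
--     return None
-- ===== Notes on version B (the rewrite author's own statement) =====
-- stated objective: faster
-- what changed: Replaces five sequential any()-scans of the token list (per-category keyword membership tests) with a single pass over the tokens using a precomputed keyword->priority dict and a min-priority accumulator; the fallback branch is unchanged.
import Mathlib
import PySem

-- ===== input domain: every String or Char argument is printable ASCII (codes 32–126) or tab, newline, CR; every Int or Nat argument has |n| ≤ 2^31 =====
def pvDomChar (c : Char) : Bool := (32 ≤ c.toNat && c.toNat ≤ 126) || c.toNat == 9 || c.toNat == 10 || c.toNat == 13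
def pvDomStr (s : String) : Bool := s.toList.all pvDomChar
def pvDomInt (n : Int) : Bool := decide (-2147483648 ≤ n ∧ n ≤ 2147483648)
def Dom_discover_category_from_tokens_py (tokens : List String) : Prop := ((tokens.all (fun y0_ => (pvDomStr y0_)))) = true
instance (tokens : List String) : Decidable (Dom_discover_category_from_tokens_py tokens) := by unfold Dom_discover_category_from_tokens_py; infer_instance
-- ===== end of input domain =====

-- B replaces A's five sequential any()-scans of the token list with one pass over the
-- tokens using a precomputed keyword -> category-priority dict and a min-priority accumulator.


-- ===== PORT A =====
def kws0 : List String := ["message","chat","mail","inbox","conversation"]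
def kws1 : List String := ["code","editor","ide","development","script"]
def kws2 : List String := ["terminal","console","shell","command"]
def kws3 : List String := ["browser","web","internet","online"]
def kws4 : List String := ["doc","document","pdf","note","text"]

def discover_category_from_tokens_py (tokens : List String) : Option String :=
  if kws0.any (fun t => tokens.contains t) then some "communication"
  else if kws1.any (fun t => tokens.contains t) then some "development"
  else if kws2.any (fun t => tokens.contains t) then some "terminal"
  else if kws3.any (fun t => tokens.contains t) then some "browser"
  else if kws4.any (fun t => tokens.contains t) then some "documentation"
  else match tokens with                               -- if len(tokens) >= 2: tokens[0], tokens[1]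
    | a :: b :: _ => some (a ++ "_" ++ b ++ "_category")
    | _ => none

-- ===== PORT B =====
-- the Python dict literal _RANK (distinct keys, insertion order as written)
def pvRank : PySem.Dict String Nat := PySem.Dict.mk
  [("message",0),("chat",0),("mail",0),("inbox",0),("conversation",0),
   ("code",1),("editor",1),("ide",1),("development",1),("script",1),
   ("terminal",2),("console",2),("shell",2),("command",2),
   ("browser",3),("web",3),("internet",3),("online",3),
   ("doc",4),("document",4),("pdf",4),("note",4),("text",4)]

def pvNames : List String := ["communication","development","terminal","browser","documentation"]

-- loop body: r = _RANK.get(t, 5); if r < best: best = r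
def pvStep (best : Nat) (t : String) : Nat :=
  if pvRank.getD t 5 < best then pvRank.getD t 5 else best

def discover_category_from_tokens_py_alt (tokens : List String) : Option String :=
  let best := tokens.foldl pvStep 5
  if best < 5 then some (pvNames.getD best "")
  else if 2 ≤ tokens.length then                       -- if len(tokens) >= 2: tokens[0], tokens[1] (both in range)
    some (tokens.getD 0 "" ++ "_" ++ tokens.getD 1 "" ++ "_category")
  else none

-- ===== PRECONDITION & SPEC =====
def Spec_discover_category_from_tokens_py (tokens : List String) (out : Option String) : Prop := out = discover_category_from_tokens_py_alt tokens
instance (tokens : List String) (out : Option String) : Decidable (Spec_discover_category_from_tokens_py tokens out) := by unfold Spec_discover_category_from_tokens_py; infer_instance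

-- ===== CLAIM (what is proved, stated in full; the proofs are below) =====
def Claim_equal_discover_category_from_tokens_py : Prop := ∀ (tokens : List String), Dom_discover_category_from_tokens_py tokens → Spec_discover_category_from_tokens_py tokens (discover_category_from_tokens_py tokens)

-- ===== LEMMAS AND PROOFS =====

-- the rank dict classifies every string: rank i exactly on the i-th keyword list, 5 elsewhere
set_option maxHeartbeats 1000000 in
theorem rk_mem_cases (t : String) :
    (pvRank.getD t 5 = 0 ∧ t ∈ kws0) ∨ (pvRank.getD t 5 = 1 ∧ t ∈ kws1) ∨
    (pvRank.getD t 5 = 2 ∧ t ∈ kws2) ∨ (pvRank.getD t 5 = 3 ∧ t ∈ kws3) ∨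
    (pvRank.getD t 5 = 4 ∧ t ∈ kws4) ∨
    (pvRank.getD t 5 = 5 ∧ t ∉ kws0 ∧ t ∉ kws1 ∧ t ∉ kws2 ∧ t ∉ kws3 ∧ t ∉ kws4) := by
  by_cases hm : t ∈ pvRank.keys
  · simp only [pvRank, PySem.Dict.keys_mk] at hm
    fin_cases hm <;> decide
  · have hc : pvRank.contains t = false := by
      rw [← Bool.not_eq_true, PySem.Dict.contains_iff_mem_keys]; exact hm
    have h5 : pvRank.getD t 5 = 5 := by
      simpa [hc] using PySem.Dict.getD_of_not_contains (d := pvRank) (k := t) (d0 := (5:Nat))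
    simp only [pvRank, PySem.Dict.keys_mk] at hm
    refine Or.inr (Or.inr (Or.inr (Or.inr (Or.inr ⟨h5, ?_, ?_, ?_, ?_, ?_⟩)))) <;>
      simp_all [kws0, kws1, kws2, kws3, kws4]

theorem rk_of_mem0 {t : String} (h : t ∈ kws0) : pvRank.getD t 5 = 0 := by fin_cases h <;> decide
theorem rk_of_mem1 {t : String} (h : t ∈ kws1) : pvRank.getD t 5 = 1 := by fin_cases h <;> decide
theorem rk_of_mem2 {t : String} (h : t ∈ kws2) : pvRank.getD t 5 = 2 := by fin_cases h <;> decide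
theorem rk_of_mem3 {t : String} (h : t ∈ kws3) : pvRank.getD t 5 = 3 := by fin_cases h <;> decide
theorem rk_of_mem4 {t : String} (h : t ∈ kws4) : pvRank.getD t 5 = 4 := by fin_cases h <;> decide

-- the fold never increases the accumulator
theorem fold_le (l : List String) : ∀ b : Nat, l.foldl pvStep b ≤ b := by
  induction l with
  | nil => intro b; simp
  | cons t l ih =>
    intro b
    have h := ih (pvStep b t)
    simp only [List.foldl_cons]
    refine h.trans ?_
    unfold pvStep; split <;> omega

-- the fold is bounded by the rank of every member
theorem fold_le_of_mem {t : String} {l : List String} (h : t ∈ l) :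
    ∀ b : Nat, l.foldl pvStep b ≤ pvRank.getD t 5 := by
  induction l with
  | nil => cases h
  | cons x l ih =>
    intro b
    rcases List.mem_cons.mp h with h | h
    · subst h
      refine (fold_le l _).trans ?_
      unfold pvStep; split <;> omega
    · simp only [List.foldl_cons]
      exact ih h _

-- the fold result is the initial value or the rank of some member
theorem fold_eq_or (l : List String) : ∀ b : Nat,
    l.foldl pvStep b = b ∨ ∃ t ∈ l, l.foldl pvStep b = pvRank.getD t 5 := by
  induction l with
  | nil => intro b; left; rfl
  | cons x l ih =>
    intro b
    simp only [List.foldl_cons]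
    rcases ih (pvStep b x) with h | ⟨t, ht, h⟩
    · by_cases hx : pvRank.getD x 5 < b
      · right
        refine ⟨x, List.mem_cons_self, ?_⟩
        rw [h]; unfold pvStep; rw [if_pos hx]
      · left
        rw [h]; unfold pvStep; rw [if_neg hx]
    · right; exact ⟨t, List.mem_cons_of_mem _ ht, h⟩

theorem main_equiv (tokens : List String) :
    discover_category_from_tokens_py tokens = discover_category_from_tokens_py_alt tokens := by
  unfold discover_category_from_tokens_py discover_category_from_tokens_py_alt
  by_cases h0 : ∃ k ∈ kws0, k ∈ tokens
  · obtain ⟨k, hk, hkt⟩ := id h0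
    have hb : tokens.foldl pvStep 5 = 0 := by
      have := fold_le_of_mem hkt 5
      rw [rk_of_mem0 hk] at this; omega
    simp [h0, hb, pvNames]
  · by_cases h1 : ∃ k ∈ kws1, k ∈ tokens
    · obtain ⟨k, hk, hkt⟩ := id h1
      have hle : tokens.foldl pvStep 5 ≤ 1 := by
        have := fold_le_of_mem hkt 5; rw [rk_of_mem1 hk] at this; omega
      have hge : 1 ≤ tokens.foldl pvStep 5 := by
        rcases fold_eq_or tokens 5 with h | ⟨t, ht, h⟩
        · omega
        · rcases rk_mem_cases t with ⟨hr, hm⟩ | ⟨hr, hm⟩ | ⟨hr, hm⟩ | ⟨hr, hm⟩ | ⟨hr, hm⟩ | ⟨hr, -, -, -, -, -⟩ <;>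
            first
            | (exact (h0 ⟨t, hm, ht⟩).elim)
            | omega
      have hb : tokens.foldl pvStep 5 = 1 := by omega
      simp [h0, h1, hb, pvNames]
    · by_cases h2 : ∃ k ∈ kws2, k ∈ tokens
      · obtain ⟨k, hk, hkt⟩ := id h2
        have hle : tokens.foldl pvStep 5 ≤ 2 := by
          have := fold_le_of_mem hkt 5; rw [rk_of_mem2 hk] at this; omega
        have hge : 2 ≤ tokens.foldl pvStep 5 := by
          rcases fold_eq_or tokens 5 with h | ⟨t, ht, h⟩
          · omega
          · rcases rk_mem_cases t with ⟨hr, hm⟩ | ⟨hr, hm⟩ | ⟨hr, hm⟩ | ⟨hr, hm⟩ | ⟨hr, hm⟩ | ⟨hr, -, -, -, -, -⟩ <;>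
              first
              | (exact (h0 ⟨t, hm, ht⟩).elim)
              | (exact (h1 ⟨t, hm, ht⟩).elim)
              | omega
        have hb : tokens.foldl pvStep 5 = 2 := by omega
        simp [h0, h1, h2, hb, pvNames]
      · by_cases h3 : ∃ k ∈ kws3, k ∈ tokens
        · obtain ⟨k, hk, hkt⟩ := id h3
          have hle : tokens.foldl pvStep 5 ≤ 3 := by
            have := fold_le_of_mem hkt 5; rw [rk_of_mem3 hk] at this; omega
          have hge : 3 ≤ tokens.foldl pvStep 5 := by
            rcases fold_eq_or tokens 5 with h | ⟨t, ht, h⟩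
            · omega
            · rcases rk_mem_cases t with ⟨hr, hm⟩ | ⟨hr, hm⟩ | ⟨hr, hm⟩ | ⟨hr, hm⟩ | ⟨hr, hm⟩ | ⟨hr, -, -, -, -, -⟩ <;>
                first
                | (exact (h0 ⟨t, hm, ht⟩).elim)
                | (exact (h1 ⟨t, hm, ht⟩).elim)
                | (exact (h2 ⟨t, hm, ht⟩).elim)
                | omega
          have hb : tokens.foldl pvStep 5 = 3 := by omega
          simp [h0, h1, h2, h3, hb, pvNames]
        · by_cases h4 : ∃ k ∈ kws4, k ∈ tokens
          · obtain ⟨k, hk, hkt⟩ := id h4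
            have hle : tokens.foldl pvStep 5 ≤ 4 := by
              have := fold_le_of_mem hkt 5; rw [rk_of_mem4 hk] at this; omega
            have hge : 4 ≤ tokens.foldl pvStep 5 := by
              rcases fold_eq_or tokens 5 with h | ⟨t, ht, h⟩
              · omega
              · rcases rk_mem_cases t with ⟨hr, hm⟩ | ⟨hr, hm⟩ | ⟨hr, hm⟩ | ⟨hr, hm⟩ | ⟨hr, hm⟩ | ⟨hr, -, -, -, -, -⟩ <;>
                  first
                  | (exact (h0 ⟨t, hm, ht⟩).elim)
                  | (exact (h1 ⟨t, hm, ht⟩).elim)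
                  | (exact (h2 ⟨t, hm, ht⟩).elim)
                  | (exact (h3 ⟨t, hm, ht⟩).elim)
                  | omega
            have hb : tokens.foldl pvStep 5 = 4 := by omega
            simp [h0, h1, h2, h3, h4, hb, pvNames]
          · -- no keyword occurs: the fold stays at 5 and both take the fallback
            have hb : tokens.foldl pvStep 5 = 5 := by
              rcases fold_eq_or tokens 5 with h | ⟨t, ht, h⟩
              · exact h
              · rcases rk_mem_cases t with ⟨hr, hm⟩ | ⟨hr, hm⟩ | ⟨hr, hm⟩ | ⟨hr, hm⟩ | ⟨hr, hm⟩ | ⟨hr, -, -, -, -, -⟩ <;>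
                  first
                  | (exact (h0 ⟨t, hm, ht⟩).elim)
                  | (exact (h1 ⟨t, hm, ht⟩).elim)
                  | (exact (h2 ⟨t, hm, ht⟩).elim)
                  | (exact (h3 ⟨t, hm, ht⟩).elim)
                  | (exact (h4 ⟨t, hm, ht⟩).elim)
                  | omega
            have b0 : (kws0.any fun t => tokens.contains t) = false := by
              rw [← Bool.not_eq_true]; simpa [List.any_eq_true] using h0
            have b1 : (kws1.any fun t => tokens.contains t) = false := by
              rw [← Bool.not_eq_true]; simpa [List.any_eq_true] using h1
            have b2 : (kws2.any fun t => tokens.contains t) = false := by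
              rw [← Bool.not_eq_true]; simpa [List.any_eq_true] using h2
            have b3 : (kws3.any fun t => tokens.contains t) = false := by
              rw [← Bool.not_eq_true]; simpa [List.any_eq_true] using h3
            have b4 : (kws4.any fun t => tokens.contains t) = false := by
              rw [← Bool.not_eq_true]; simpa [List.any_eq_true] using h4
            simp only [b0, b1, b2, b3, b4, Bool.false_eq_true, if_false, hb]
            rcases tokens with _ | ⟨a, _ | ⟨b, rest⟩⟩ <;> simp

-- ===== VERDICT (by name: the statement is the Claim_ definition above) =====
theorem discover_category_from_tokens_py_spec : Claim_equal_discover_category_from_tokens_py := by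
  intro tokens _
  unfold Spec_discover_category_from_tokens_py
  exact main_equiv tokens
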